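-- pv_equiv track=rewrite | github.com/ayushnangia/cracking-ARC-AGI | nca-code/new_experiments/multi-nca.py | depad_grid
-- ===== SOURCE A (Python) =====
-- from typing import List, Dict, Any, Tuple
--
-- def depad_grid(grid: List[List[int]], padding_value: int = -1) -> List[List[int]]:
--     if not grid or not grid[0]: return [[padding_value]]
--
--     rows = len(grid)
--     cols = len(grid[0])
--     min_r, max_r, min_c, max_c = -1, -1, cols, -1
--     found_non_padding = False
--
--     for r_idx in range(rows):
--         for c_idx in range(cols):
--             if grid[r_idx][c_idx] != padding_value:
--                 if not found_non_padding: min_r = r_idx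
--                 max_r = max(max_r, r_idx)
--                 min_c = min(min_c, c_idx)
--                 max_c = max(max_c, c_idx)
--                 found_non_padding = True
--
--     if not found_non_padding: return [[padding_value]]
--
--     return [row[min_c : max_c + 1] for row in grid[min_r : max_r + 1]]
-- ===== SOURCE B (Python) =====
-- def depad_grid(grid, padding_value=-1):
--     if not grid or not grid[0]:
--         return [[padding_value]]
--     cols = len(grid[0])
--     rows_with = [r for r in range(len(grid))
--                  if any(grid[r][c] != padding_value for c in range(cols))]
--     cols_with = [c for c in range(cols)
--                  if any(row[c] != padding_value for row in grid)]
--     if not rows_with: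
--         return [[padding_value]]
--     return [row[cols_with[0]:cols_with[-1] + 1]
--             for row in grid[rows_with[0]:rows_with[-1] + 1]]
-- ===== Notes on version B (the rewrite author's own statement) =====
-- stated objective: simpler
-- what changed: Replaces the single nested scan that threads a five-part (min_r,max_r,min_c,max_c,found) accumulator through every cell by two independent comprehensions listing the occupied row indices and occupied column indices, reading the bounding box off their first and last elements.
import Mathlib
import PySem

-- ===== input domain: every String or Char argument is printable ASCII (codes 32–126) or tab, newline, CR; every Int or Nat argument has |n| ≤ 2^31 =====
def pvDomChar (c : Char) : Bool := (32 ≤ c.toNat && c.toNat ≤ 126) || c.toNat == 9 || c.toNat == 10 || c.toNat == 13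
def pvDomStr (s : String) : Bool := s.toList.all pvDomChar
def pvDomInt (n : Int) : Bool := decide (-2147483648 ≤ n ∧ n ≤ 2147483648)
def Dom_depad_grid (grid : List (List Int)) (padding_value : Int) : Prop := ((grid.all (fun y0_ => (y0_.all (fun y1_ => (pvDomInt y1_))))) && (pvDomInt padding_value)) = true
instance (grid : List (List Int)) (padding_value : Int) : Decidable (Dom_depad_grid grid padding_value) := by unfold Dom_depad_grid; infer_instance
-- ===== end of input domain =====

-- B replaces A's single nested scan threading a (min_r,max_r,min_c,max_c,found) accumulator by two
-- comprehensions listing occupied rows and occupied columns (simpler; measured constant-factor faster).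
-- ===== PORT A =====
def depad_grid (grid : List (List Int)) (padding_value : Int) : List (List Int) :=
  if grid = [] ∨ grid.headD [] = [] then [[padding_value]]
  else
    let rows : Int := (grid.length : Int)
    let cols : Int := ((grid.headD []).length : Int)
    let s : Int × Int × Int × Int × Bool :=
      (PySem.List.pyRange 0 rows 1).foldl (fun s r_idx =>
        (PySem.List.pyRange 0 cols 1).foldl (fun s c_idx =>
          if PySem.List.pyGetD (PySem.List.pyGetD grid r_idx []) c_idx 0 ≠ padding_value then
            ((if s.2.2.2.2 = false then r_idx else s.1),
             max s.2.1 r_idx, min s.2.2.1 c_idx, max s.2.2.2.1 c_idx, true)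
          else s) s)
        (-1, -1, cols, -1, false)
    if s.2.2.2.2 = false then [[padding_value]]
    else (PySem.List.slice grid (some s.1) (some (s.2.1 + 1))).map
        (fun row => PySem.List.slice row (some s.2.2.1) (some (s.2.2.2.1 + 1)))

-- ===== PORT B =====
def depad_grid_alt (grid : List (List Int)) (padding_value : Int) : List (List Int) :=
  if grid = [] ∨ grid.headD [] = [] then [[padding_value]]
  else
    let cols : Int := ((grid.headD []).length : Int)
    let rows_with : List Int := (PySem.List.pyRange 0 (grid.length : Int) 1).filter
      (fun r => (PySem.List.pyRange 0 cols 1).any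
        (fun c => decide (PySem.List.pyGetD (PySem.List.pyGetD grid r []) c 0 ≠ padding_value)))
    let cols_with : List Int := (PySem.List.pyRange 0 cols 1).filter
      (fun c => grid.any (fun row => decide (PySem.List.pyGetD row c 0 ≠ padding_value)))
    if rows_with = [] then [[padding_value]]
    else (PySem.List.slice grid (some (PySem.List.pyGetD rows_with 0 0))
            (some (PySem.List.pyGetD rows_with (-1) 0 + 1))).map
      (fun row => PySem.List.slice row (some (PySem.List.pyGetD cols_with 0 0))
            (some (PySem.List.pyGetD cols_with (-1) 0 + 1)))

-- ===== PRECONDITION & SPEC =====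
-- Pre_ excludes exactly the jagged grids on which Python A raises IndexError: A reads every column
-- index below len(grid[0]) in every row, so it raises iff some row is shorter than the first row.
def Pre_depad_grid (grid : List (List Int)) (padding_value : Int) : Prop :=
  ∀ row ∈ grid, (grid.headD []).length ≤ row.length
instance (grid : List (List Int)) (padding_value : Int) : Decidable (Pre_depad_grid grid padding_value) := by unfold Pre_depad_grid; infer_instance
def pvWitness_depad_grid : List (List Int) × Int := ([[-1, 3], [-1, -1]], -1)

def Spec_depad_grid (grid : List (List Int)) (padding_value : Int) (out : List (List Int)) : Prop := out = depad_grid_alt grid padding_value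
instance (grid : List (List Int)) (padding_value : Int) (out : List (List Int)) : Decidable (Spec_depad_grid grid padding_value out) := by unfold Spec_depad_grid; infer_instance

-- ===== CLAIM (what is proved, stated in full; the proofs are below) =====
def Claim_equal_depad_grid : Prop := ∀ (grid : List (List Int)) (padding_value : Int), Dom_depad_grid grid padding_value → Pre_depad_grid grid padding_value → Spec_depad_grid grid padding_value (depad_grid grid padding_value)

-- ===== LEMMAS AND PROOFS =====

-- cell (r,c) of the grid is occupied (differs from the padding value)
def pvOcc (g : List (List Int)) (p : Int) (r c : Int) : Bool :=
  decide (PySem.List.pyGetD (PySem.List.pyGetD g r []) c 0 ≠ p)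

-- occupied row indices among the first k rows
def pvRowsW (g : List (List Int)) (p : Int) (m : Int) (k : Int) : List Int :=
  (PySem.List.pyRange 0 k 1).filter
    (fun r => (PySem.List.pyRange 0 m 1).any (fun c => pvOcc g p r c))

-- occupied column indices (looking at the first k rows)
def pvColsW (g : List (List Int)) (p : Int) (m : Int) (k : Int) : List Int :=
  (PySem.List.pyRange 0 m 1).filter
    (fun c => (PySem.List.pyRange 0 k 1).any (fun r => pvOcc g p r c))

-- the state A's scan reaches after the first k rows
def pvS (g : List (List Int)) (p : Int) (m : Int) (k : Int) : Int × Int × Int × Int × Bool :=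
  ((pvRowsW g p m k).headD (-1), (pvRowsW g p m k).getLastD (-1),
   (pvColsW g p m k).headD m, (pvColsW g p m k).getLastD (-1),
   !(pvRowsW g p m k).isEmpty)

theorem pv_headD_irrel {α : Type} (l : List α) (h : l ≠ []) (d d' : α) :
    l.headD d = l.headD d' := by cases l with | nil => exact absurd rfl h | cons x xs => rfl

theorem pv_getLastD_irrel {α : Type} (l : List α) (h : l ≠ []) (d d' : α) :
    l.getLastD d = l.getLastD d' := by
  rw [List.getLastD_eq_getLast?, List.getLastD_eq_getLast?]
  obtain ⟨x, hx⟩ := Option.ne_none_iff_exists'.mp (mt List.getLast?_eq_none_iff.mp h)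
  simp [hx]

theorem pv_getLastD_mem {α : Type} (l : List α) (h : l ≠ []) (d : α) :
    l.getLastD d ∈ l := by
  rw [List.getLastD_eq_getLast?]
  obtain ⟨x, hx⟩ := Option.ne_none_iff_exists'.mp (mt List.getLast?_eq_none_iff.mp h)
  simpa [hx] using List.mem_of_getLast? hx

theorem pv_foldl_min_sorted {α : Type} [LinearOrder α] (l : List α) (d : α)
    (hs : l.Pairwise (· < ·)) : l.foldl min d = min d (l.headD d) := by
  induction l generalizing d with
  | nil => simp
  | cons x xs ih =>
    simp only [List.foldl_cons, List.headD_cons]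
    rw [ih (min d x) (hs.of_cons)]
    cases xs with
    | nil => simp
    | cons y ys =>
      have hxy : x < y := (List.pairwise_cons.mp hs).1 y (by simp)
      simp only [List.headD_cons]
      rw [min_assoc]
      congr 1
      exact min_eq_left hxy.le

theorem pv_foldl_max_sorted {α : Type} [LinearOrder α] (l : List α) (d : α)
    (hs : l.Pairwise (· < ·)) : l.foldl max d = max d (l.getLastD d) := by
  induction l generalizing d with
  | nil => simp
  | cons x xs ih =>
    simp only [List.foldl_cons, List.getLastD_cons]
    rw [ih (max d x) (hs.of_cons)]
    cases hxs : xs with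
    | nil => simp
    | cons y ys =>
      have hne : xs ≠ [] := by simp [hxs]
      have hx : x < xs.getLastD x :=
        (List.pairwise_cons.mp hs).1 _ (pv_getLastD_mem xs hne x)
      rw [← hxs, pv_getLastD_irrel xs hne (max d x) x, max_assoc,
        max_eq_right hx.le]

theorem pv_headD_filter_mem {α : Type} (q : α → Bool) (l : List α) (d : α) :
    (l.filter q).headD d = d ∨ (l.filter q).headD d ∈ l := by
  cases h : l.filter q with
  | nil => left; rfl
  | cons x xs =>
    right
    have : x ∈ l.filter q := by rw [h]; simp
    simpa using (List.mem_filter.mp this).1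

theorem pv_headD_filter_or {α : Type} [LinearOrder α] (q q' : α → Bool) (l : List α) (d : α)
    (hlt : ∀ y ∈ l, y < d) (hs : l.Pairwise (· < ·)) :
    (l.filter (fun c => q c || q' c)).headD d
      = min ((l.filter q).headD d) ((l.filter q').headD d) := by
  induction l with
  | nil => simp
  | cons x xs ih =>
    have hxd : x < d := hlt x (by simp)
    have hxlt : ∀ y ∈ xs, x < y := (List.pairwise_cons.mp hs).1
    have hmin : ∀ (p : α → Bool), min x ((xs.filter p).headD d) = x := by
      intro p
      rcases pv_headD_filter_mem p xs d with h | h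
      · rw [h]; exact min_eq_left hxd.le
      · exact min_eq_left (hxlt _ h).le
    rcases hq : q x <;> rcases hq' : q' x <;>
      simp only [List.filter_cons, hq, hq', Bool.or_self, Bool.or_false, Bool.or_true,
        List.headD_cons, if_true, Bool.false_eq_true, if_false]
    · exact ih (fun y hy => hlt y (by simp [hy])) hs.of_cons
    · rw [min_comm, hmin q]
    · rw [hmin q']
    · simp

theorem pv_getLastD_filter_or {α : Type} [LinearOrder α] (q q' : α → Bool) (l : List α)
    (d1 d2 : α) (h1 : ∀ y ∈ l, d1 < y) (h2 : ∀ y ∈ l, d2 < y) (hs : l.Pairwise (· < ·)) :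
    (l.filter (fun c => q c || q' c)).getLastD (max d1 d2)
      = max ((l.filter q).getLastD d1) ((l.filter q').getLastD d2) := by
  induction l generalizing d1 d2 with
  | nil => simp
  | cons x xs ih =>
    have hxd1 : d1 < x := h1 x (by simp)
    have hxd2 : d2 < x := h2 x (by simp)
    have h1' : ∀ y ∈ xs, d1 < y := fun y hy => h1 y (by simp [hy])
    have h2' : ∀ y ∈ xs, d2 < y := fun y hy => h2 y (by simp [hy])
    have hx' : ∀ y ∈ xs, x < y := (List.pairwise_cons.mp hs).1
    rcases hq : q x <;> rcases hq' : q' x <;>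
      simp only [List.filter_cons, hq, hq', Bool.or_self, Bool.or_false, Bool.or_true,
        List.getLastD_cons, if_true, Bool.false_eq_true, if_false]
    · exact ih d1 d2 h1' h2' hs.of_cons
    · have := ih d1 x h1' hx' hs.of_cons
      rwa [max_eq_right hxd1.le] at this
    · have := ih x d2 hx' h2' hs.of_cons
      rwa [max_eq_left hxd2.le] at this
    · have := ih x x hx' hx' hs.of_cons
      rwa [max_self] at this

-- A's inner (per-row) loop, characterized by the occupied columns of that row
theorem pv_inner (g : List (List Int)) (p : Int) (r : Int) (cs : List Int)
    (s : Int × Int × Int × Int × Bool) :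
    cs.foldl (fun s c_idx =>
        if PySem.List.pyGetD (PySem.List.pyGetD g r []) c_idx 0 ≠ p then
          ((if s.2.2.2.2 = false then r else s.1),
           max s.2.1 r, min s.2.2.1 c_idx, max s.2.2.2.1 c_idx, true)
        else s) s
      = if (cs.filter (pvOcc g p r)) = [] then s else
          ((if s.2.2.2.2 = false then r else s.1), max s.2.1 r,
           (cs.filter (pvOcc g p r)).foldl min s.2.2.1,
           (cs.filter (pvOcc g p r)).foldl max s.2.2.2.1, true) := by
  induction cs generalizing s with
  | nil => simp
  | cons c cs ih =>
    by_cases h : PySem.List.pyGetD (PySem.List.pyGetD g r []) c 0 ≠ p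
    · have hocc : pvOcc g p r c = true := by simp [pvOcc, h]
      simp only [List.foldl_cons, if_pos h, List.filter_cons, hocc, if_true]
      rw [ih]
      by_cases hnil : cs.filter (pvOcc g p r) = []
      · simp [hnil]
      · simp only [hnil, if_false,
          show ¬(c :: cs.filter (pvOcc g p r) = []) from by simp]
        simp
    · have hocc : pvOcc g p r c = false := by simp [pvOcc] at h ⊢; simpa using h
      simp only [List.foldl_cons, if_neg h, List.filter_cons, hocc, Bool.false_eq_true, if_false]
      exact ih s

-- A's outer loop reaches exactly the state pvS
theorem pv_outer (g : List (List Int)) (p : Int) (m : Nat) (k : Nat) :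
    (PySem.List.pyRange 0 (k : Int) 1).foldl (fun s r_idx =>
        (PySem.List.pyRange 0 (m : Int) 1).foldl (fun s c_idx =>
          if PySem.List.pyGetD (PySem.List.pyGetD g r_idx []) c_idx 0 ≠ p then
            ((if s.2.2.2.2 = false then r_idx else s.1),
             max s.2.1 r_idx, min s.2.2.1 c_idx, max s.2.2.2.1 c_idx, true)
          else s) s)
        (-1, -1, (m : Int), -1, false)
      = pvS g p (m : Int) (k : Int) := by
  induction k with
  | zero =>
    rw [show ((0 : Nat) : Int) = 0 from rfl, PySem.List.pyRange_one_eq_nil le_rfl]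
    simp [pvS, pvRowsW, pvColsW, PySem.List.pyRange_one_eq_nil le_rfl]
  | succ k ih =>
    have hcast : ((k + 1 : Nat) : Int) = (k : Int) + 1 := by push_cast; ring
    rw [hcast, PySem.List.pyRange_one_succ_right (by positivity), List.foldl_append, ih]
    simp only [List.foldl_cons, List.foldl_nil]
    rw [pv_inner]
    by_cases hnil : (PySem.List.pyRange 0 (m : Int) 1).filter (pvOcc g p (k : Int)) = []
    · -- row k has no occupied cell: the state does not move
      have hocc0 : ∀ c ∈ PySem.List.pyRange 0 (m : Int) 1, pvOcc g p (k : Int) c = false := by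
        intro c hc
        have := (List.filter_eq_nil_iff.mp hnil) c hc
        simpa using this
      have hrows : pvRowsW g p (m : Int) ((k : Int) + 1) = pvRowsW g p (m : Int) (k : Int) := by
        unfold pvRowsW
        rw [PySem.List.pyRange_one_succ_right (by positivity), List.filter_append]
        have : ((PySem.List.pyRange 0 (m : Int) 1).any fun c => pvOcc g p (k : Int) c) = false := by
          rw [List.any_eq_false]; intro c hc; simp [hocc0 c hc]
        simp [this]
      have hcols : pvColsW g p (m : Int) ((k : Int) + 1) = pvColsW g p (m : Int) (k : Int) := by
        unfold pvColsW
        apply List.filter_congr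
        intro c hc
        rw [PySem.List.pyRange_one_succ_right (by positivity), List.any_append]
        simp [hocc0 c hc]
      simp [hnil, pvS, hrows, hcols]
    · -- row k is occupied
      have hany : ((PySem.List.pyRange 0 (m : Int) 1).any fun c => pvOcc g p (k : Int) c) = true := by
        by_contra hza
        exact hnil (List.filter_eq_nil_iff.mpr (by
          intro c hc
          have := List.any_eq_false.mp (Bool.eq_false_iff.mpr hza) c hc
          simpa using this))
      have hrows : pvRowsW g p (m : Int) ((k : Int) + 1)
          = pvRowsW g p (m : Int) (k : Int) ++ [(k : Int)] := by
        unfold pvRowsW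
        rw [PySem.List.pyRange_one_succ_right (by positivity), List.filter_append]
        simp [hany]
      have hcols : pvColsW g p (m : Int) ((k : Int) + 1)
          = (PySem.List.pyRange 0 (m : Int) 1).filter
              (fun c => ((PySem.List.pyRange 0 (k : Int) 1).any fun r => pvOcc g p r c)
                || pvOcc g p (k : Int) c) := by
        unfold pvColsW
        apply List.filter_congr
        intro c hc
        rw [PySem.List.pyRange_one_succ_right (by positivity), List.any_append]
        simp
      have hltm : ∀ y ∈ PySem.List.pyRange 0 (m : Int) 1, y < (m : Int) := by
        intro y hy; exact (PySem.List.mem_pyRange_one.mp hy).2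
      have hgtm : ∀ y ∈ PySem.List.pyRange 0 (m : Int) 1, (-1 : Int) < y := by
        intro y hy; have := (PySem.List.mem_pyRange_one.mp hy).1; omega
      have hsorted : ((PySem.List.pyRange 0 (m : Int) 1).filter
          (pvOcc g p (k : Int))).Pairwise (· < ·) :=
        (PySem.List.pairwise_lt_pyRange_one 0 (m : Int)).filter _
      simp only [hnil, if_false, pvS, hrows, hcols]
      refine Prod.ext ?_ (Prod.ext ?_ (Prod.ext ?_ (Prod.ext ?_ ?_)))
      · -- min_r
        by_cases hre : pvRowsW g p (m : Int) (k : Int) = []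
        · simp [hre]
        · have : (!(pvRowsW g p (m : Int) (k : Int)).isEmpty) = true := by
            simpa using hre
          simp only [this]
          obtain ⟨x, xs, hx⟩ := List.exists_cons_of_ne_nil hre
          simp [hx]
      · -- max_r
        simp only [List.getLastD_concat]
        by_cases hre : pvRowsW g p (m : Int) (k : Int) = []
        · simp only [hre, List.getLastD_nil]
          simp
        · have hmem : (pvRowsW g p (m : Int) (k : Int)).getLastD (-1)
              ∈ PySem.List.pyRange 0 (k : Int) 1 := by
            have := pv_getLastD_mem _ hre (-1 : Int)
            exact (List.mem_filter.mp (by unfold pvRowsW at this ⊢; exact this)).1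
          have : (pvRowsW g p (m : Int) (k : Int)).getLastD (-1) < (k : Int) :=
            (PySem.List.mem_pyRange_one.mp hmem).2
          omega
      · -- min_c
        rw [pv_foldl_min_sorted _ _ hsorted,
          pv_headD_irrel _ hnil _ ((m : Nat) : Int),
          pv_headD_filter_or _ _ _ _ hltm (PySem.List.pairwise_lt_pyRange_one 0 (m : Int))]
        rfl
      · -- max_c
        rw [pv_foldl_max_sorted _ _ hsorted,
          pv_getLastD_irrel _ hnil _ (-1 : Int),
          show (-1 : Int) = max (-1) (-1) from by simp,
          pv_getLastD_filter_or _ _ _ _ _ hgtm hgtm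
            (PySem.List.pairwise_lt_pyRange_one 0 (m : Int))]
        rfl
      · -- found
        simp

-- a list's .any equals .any over its index range
theorem pv_any_index (g : List (List Int)) (q : List Int → Bool) :
    g.any q = (PySem.List.pyRange 0 (g.length : Int) 1).any
      (fun r => q (PySem.List.pyGetD g r [])) := by
  rw [PySem.List.pyRange_zero_natCast, List.any_map]
  rw [Bool.eq_iff_iff]
  simp only [List.any_eq_true, Function.comp, List.mem_range]
  constructor
  · rintro ⟨x, hx, hqx⟩
    obtain ⟨i, hi, hgi⟩ := List.mem_iff_getElem.mp hx
    exact ⟨i, by simpa using hi, by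
      rw [PySem.List.pyGetD_natCast, List.getD_eq_getElem _ _ hi, hgi]; exact hqx⟩
  · rintro ⟨i, hi, hqi⟩
    have hi' : i < g.length := by simpa using hi
    rw [PySem.List.pyGetD_natCast, List.getD_eq_getElem _ _ hi'] at hqi
    exact ⟨g[i], List.getElem_mem hi', hqi⟩

theorem pv_colsW_ne_nil (g : List (List Int)) (p : Int) (m k : Int)
    (h : pvRowsW g p m k ≠ []) : pvColsW g p m k ≠ [] := by
  unfold pvRowsW at h
  obtain ⟨r, hr⟩ := List.exists_mem_of_ne_nil _ h
  have hr' := List.mem_filter.mp hr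
  obtain ⟨c, hcmem, hcocc⟩ := List.any_eq_true.mp hr'.2
  unfold pvColsW
  intro hcontra
  have := List.filter_eq_nil_iff.mp hcontra c hcmem
  exact this (List.any_eq_true.mpr ⟨r, hr'.1, hcocc⟩)

-- ===== VERDICT (by name: the statement is the Claim_ definition above) =====
theorem depad_grid_spec : Claim_equal_depad_grid := by
  intro g p _hdom _hpre
  unfold Spec_depad_grid depad_grid depad_grid_alt
  by_cases hguard : g = [] ∨ g.headD [] = []
  · rw [if_pos hguard, if_pos hguard]
  · rw [if_neg hguard, if_neg hguard]
    dsimp only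
    rw [pv_outer g p (g.headD []).length g.length]
    have hrowseq : (PySem.List.pyRange 0 (g.length : Int) 1).filter
        (fun r => (PySem.List.pyRange 0 ((g.headD []).length : Int) 1).any
          (fun c => decide (PySem.List.pyGetD (PySem.List.pyGetD g r []) c 0 ≠ p)))
        = pvRowsW g p ((g.headD []).length : Int) (g.length : Int) := rfl
    have hcolseq : (PySem.List.pyRange 0 ((g.headD []).length : Int) 1).filter
        (fun c => g.any (fun row => decide (PySem.List.pyGetD row c 0 ≠ p)))
        = pvColsW g p ((g.headD []).length : Int) (g.length : Int) := by
      unfold pvColsW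
      apply List.filter_congr
      intro c _hc
      exact pv_any_index g (fun row => decide (PySem.List.pyGetD row c 0 ≠ p))
    rw [hrowseq, hcolseq]
    by_cases hre : pvRowsW g p ((g.headD []).length : Int) (g.length : Int) = []
    · have hf : (pvS g p ((g.headD []).length : Int) (g.length : Int)).2.2.2.2 = false := by
        simp only [pvS, hre, List.isEmpty_nil, Bool.not_true]
      rw [if_pos hf, if_pos hre]
    · have hce := pv_colsW_ne_nil g p _ _ hre
      have hf : ¬ ((pvS g p ((g.headD []).length : Int) (g.length : Int)).2.2.2.2 = false) := by
        simp only [pvS, Bool.not_eq_false, Bool.not_eq_true']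
        simpa using hre
      rw [if_neg hf, if_neg hre]
      simp only [pvS]
      rw [PySem.List.pyGetD_zero, PySem.List.pyGetD_zero,
        PySem.List.pyGetD_neg_one (h := hre), PySem.List.pyGetD_neg_one (h := hce)]
      have h1 : (pvRowsW g p ((g.headD []).length : Int) (g.length : Int)).getD 0 0
          = (pvRowsW g p ((g.headD []).length : Int) (g.length : Int)).headD (-1) := by
        obtain ⟨x, xs, hx⟩ := List.exists_cons_of_ne_nil hre
        simp only [hx, List.getD_cons_zero, List.headD_cons]
      have h2 : (pvColsW g p ((g.headD []).length : Int) (g.length : Int)).getD 0 0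
          = (pvColsW g p ((g.headD []).length : Int) (g.length : Int)).headD
              (((g.headD []).length : Nat) : Int) := by
        obtain ⟨x, xs, hx⟩ := List.exists_cons_of_ne_nil hce
        simp only [hx, List.getD_cons_zero, List.headD_cons]
      have h3 : (pvRowsW g p ((g.headD []).length : Int) (g.length : Int)).getLast hre
          = (pvRowsW g p ((g.headD []).length : Int) (g.length : Int)).getLastD (-1) := by
        rw [List.getLastD_eq_getLast?, List.getLast?_eq_some_getLast hre]; rfl
      have h4 : (pvColsW g p ((g.headD []).length : Int) (g.length : Int)).getLast hce
          = (pvColsW g p ((g.headD []).length : Int) (g.length : Int)).getLastD (-1) := by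
        rw [List.getLastD_eq_getLast?, List.getLast?_eq_some_getLast hce]; rfl
      rw [h1, h2, h3, h4]
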